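-- pv_equiv track=rewrite | github.com/acrokat/eecs486 | public_dataset/tweet_process.py | tokenize_dashes
-- ===== SOURCE A (Python) =====
-- def tokenize_dashes(tokens):
--
--     temp_tokens = []
--     for token in tokens:
--         start_pos = 0
--         index = token.find('-', start_pos)
--         # loop until have checked every -
--         # remove dashes that are not indicative of a pharse i.e. state-of-the-art
--         while(index != -1):
--             start_pos = index
--             if index == 0:
--                 token = token[1:]
--             elif index == len(token)-1:
--                 token = token[:len(token)-1]
--             elif not token[index-1:index].isalnum() or not token[index+1:index+2].isalnum():
--                 token = token[:index] + token[index+1:]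
--             else:
--                 start_pos = start_pos + 1
--             index = token.find('-', start_pos)
--
--         # check for empty strings
--         if token:
--             temp_tokens.append(token)
--
--     return temp_tokens
-- ===== SOURCE B (Python) =====
-- def tokenize_dashes(tokens):
--     # Single pass per token: each maximal run of dashes becomes one dash
--     # iff the characters flanking the run are both alphanumeric, else vanishes.
--     temp_tokens = []
--     for token in tokens:
--         n = len(token)
--         out = []
--         i = 0
--         while i < n:
--             c = token[i]
--             if c != '-':
--                 out.append(c)
--                 i += 1
--             else:
--                 j = i + 1
--                 while j < n and token[j] == '-':
--                     j += 1
--                 if i > 0 and j < n and token[i-1].isalnum() and token[j].isalnum():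
--                     out.append('-')
--                 i = j
--         t = ''.join(out)
--         if t:
--             temp_tokens.append(t)
--     return temp_tokens
-- ===== Notes on version B (the rewrite author's own statement) =====
-- stated objective: alternative
-- what changed: A repeatedly re-finds the next dash and rebuilds the token by slicing, deleting or keeping one dash at a time; B makes a single left-to-right pass per token, collapsing each maximal dash run to one dash iff the characters flanking the run are both alphanumeric, else dropping the run.
import Mathlib
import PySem

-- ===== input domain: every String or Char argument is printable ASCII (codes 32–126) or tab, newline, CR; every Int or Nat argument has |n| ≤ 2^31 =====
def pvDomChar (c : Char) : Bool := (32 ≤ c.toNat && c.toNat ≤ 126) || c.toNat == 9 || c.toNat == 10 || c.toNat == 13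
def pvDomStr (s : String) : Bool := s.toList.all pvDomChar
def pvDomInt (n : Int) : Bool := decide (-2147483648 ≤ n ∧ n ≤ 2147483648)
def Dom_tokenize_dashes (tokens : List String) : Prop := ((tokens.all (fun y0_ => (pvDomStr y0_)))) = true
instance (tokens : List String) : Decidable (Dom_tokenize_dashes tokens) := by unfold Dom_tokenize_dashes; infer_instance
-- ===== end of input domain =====

-- B replaces A's find/delete-one-dash-at-a-time rescan loop with a single left-to-right
-- pass over each token's dash runs (a different algorithm of similar measured cost).

-- ===== PORT A =====
-- A's while loop: find the next '-' from start_pos; drop it at either end, drop it when a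
-- flanking char is not alphanumeric, else advance past it.  The loop is ported with a fuel
-- parameter solely to make it total; fuel len+1 is proved sufficient below (pvKey).
def pvLoopA : Nat → List Char → Int → List Char
  | 0, token, _ => token
  | fuel+1, token, start_pos =>
    let index := PySem.Chars.findFrom token ['-'] start_pos none
    if index ≠ -1 then
      if index = 0 then
        pvLoopA fuel (PySem.Chars.slice token (some 1) none) index
      else if index = PySem.Chars.len token - 1 then
        pvLoopA fuel (PySem.Chars.slice token none (some (PySem.Chars.len token - 1))) index
      else if (!PySem.Chars.strIsalnum (PySem.Chars.slice token (some (index-1)) (some index))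
               || !PySem.Chars.strIsalnum (PySem.Chars.slice token (some (index+1)) (some (index+2)))) then
        pvLoopA fuel (PySem.Chars.slice token none (some index) ++ PySem.Chars.slice token (some (index+1)) none) index
      else
        pvLoopA fuel token (index + 1)
    else token

def tokenize_dashes (tokens : List String) : List String :=
  tokens.foldl (fun temp_tokens token =>
    let t := pvLoopA (token.toList.length + 1) token.toList 0
    if t ≠ [] then temp_tokens ++ [String.ofList t] else temp_tokens) []

-- ===== PORT B =====
-- flank check of Source B: `i > 0 and j < n and token[i-1].isalnum() and token[j].isalnum()`
def pvFlank : Option Char → List Char → Bool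
  | some p, d :: _ => PySem.Chars.isalnum p && PySem.Chars.isalnum d
  | _, _ => false

-- one pass; prev = the character written just before the current position (none at start)
def pvRunB : Option Char → List Char → List Char
  | _, [] => []
  | prev, c :: rest =>
    if c ≠ '-' then
      c :: pvRunB (some c) rest
    else
      let rest' := rest.dropWhile (fun x => x = '-')
      if pvFlank prev rest' then '-' :: pvRunB (some '-') rest'
      else pvRunB prev rest'
termination_by _ cs => cs.length
decreasing_by
  · simp
  · have := List.length_dropWhile_le (fun x => x = '-') rest; simp; omega
  · have := List.length_dropWhile_le (fun x => x = '-') rest; simp; omega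

def tokenize_dashes_alt (tokens : List String) : List String :=
  tokens.foldl (fun temp_tokens token =>
    let t := pvRunB none token.toList
    if t ≠ [] then temp_tokens ++ [String.ofList t] else temp_tokens) []

-- ===== PRECONDITION & SPEC =====
def Spec_tokenize_dashes (tokens : List String) (out : List String) : Prop := out = tokenize_dashes_alt tokens
instance (tokens : List String) (out : List String) : Decidable (Spec_tokenize_dashes tokens out) := by unfold Spec_tokenize_dashes; infer_instance

-- ===== CLAIM (what is proved, stated in full; the proofs are below) =====
def Claim_equal_tokenize_dashes : Prop := ∀ (tokens : List String), Dom_tokenize_dashes tokens → Spec_tokenize_dashes tokens (tokenize_dashes tokens)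

-- ===== LEMMAS AND PROOFS =====

theorem pvRunB_nil (prev : Option Char) : pvRunB prev [] = [] := by rw [pvRunB]

theorem pvRunB_cons_nondash (prev : Option Char) (c : Char) (rest : List Char) (h : c ≠ '-') :
    pvRunB prev (c :: rest) = c :: pvRunB (some c) rest := by
  rw [pvRunB]; simp [h]

theorem pvRunB_cons_dash (prev : Option Char) (rest : List Char) :
    pvRunB prev ('-' :: rest) =
      (if pvFlank prev (rest.dropWhile (fun x => x = '-'))
       then '-' :: pvRunB (some '-') (rest.dropWhile (fun x => x = '-'))
       else pvRunB prev (rest.dropWhile (fun x => x = '-'))) := by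
  rw [pvRunB]; simp

-- L0: a token with no dash passes through unchanged, and the prev marker after a clean
-- prefix w is w's last character (L3 below is the general form).
theorem pvRunB_clean_append (w : List Char) (hw : '-' ∉ w) :
    ∀ (prev : Option Char) (t : List Char),
      pvRunB prev (w ++ t) = w ++ pvRunB (w.getLast?.or prev) t := by
  induction w with
  | nil => intro prev t; simp
  | cons c w' ih =>
    intro prev t
    have hc : c ≠ '-' := fun h => hw (by simp [h])
    have hw' : '-' ∉ w' := fun h => hw (by simp [h])
    rw [List.cons_append, pvRunB_cons_nondash _ _ _ hc, ih hw' (some c)]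
    have hl : (w'.getLast?.or (some c)) = ((c :: w').getLast?.or prev) := by
      cases w' with
      | nil => simp
      | cons d w'' =>
        obtain ⟨x, hx⟩ := Option.isSome_iff_exists.mp (List.getLast?_isSome.mpr (by simp : (d :: w'') ≠ []))
        rw [List.getLast?_cons_cons, hx]; simp
    rw [hl]; simp

theorem pvRunB_clean (prev : Option Char) (v : List Char) (hv : '-' ∉ v) :
    pvRunB prev v = v := by
  have := pvRunB_clean_append v hv prev []
  simpa [pvRunB_nil] using this

-- L1: a leading dash with nothing before it is dropped
theorem pvRunB_none_dash (r : List Char) : pvRunB none ('-' :: r) = pvRunB none r := by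
  rw [pvRunB_cons_dash]
  have : pvFlank none (r.dropWhile (fun x => x = '-')) = false := by
    cases r.dropWhile (fun x => x = '-') <;> simp [pvFlank]
  rw [this, if_neg (by simp)]
  cases r with
  | nil => simp
  | cons d r₂ =>
    by_cases hd : d = '-'
    · subst hd; rw [pvRunB_cons_dash]
      have : pvFlank none (r₂.dropWhile (fun x => x = '-')) = false := by
        cases r₂.dropWhile (fun x => x = '-') <;> simp [pvFlank]
      rw [this, if_neg (by simp)]
      simp
    · simp [hd]

-- L2: a trailing dash after a clean prefix is dropped
theorem pvRunB_clean_trailing (prev : Option Char) (w : List Char) (hw : '-' ∉ w) :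
    pvRunB prev (w ++ ['-']) = w := by
  rw [pvRunB_clean_append w hw, pvRunB_cons_dash]
  have : pvFlank (w.getLast?.or prev) ([].dropWhile (fun x => x = '-')) = false := by
    simp [pvFlank]
  simp only [List.dropWhile_nil] at this ⊢
  rw [this, if_neg (by simp), pvRunB_nil, List.append_nil]

-- L4a: two adjacent dashes collapse to the treatment of one
theorem pvRunB_dash_dash (prev : Option Char) (r : List Char) :
    pvRunB prev ('-' :: '-' :: r) = pvRunB prev ('-' :: r) := by
  rw [pvRunB_cons_dash, pvRunB_cons_dash]
  simp

-- L4b: a dash whose flanks fail the alnum test is dropped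
theorem pvRunB_dash_drop (p : Char) (d : Char) (r : List Char) (hd : d ≠ '-')
    (h : (PySem.Chars.isalnum p && PySem.Chars.isalnum d) = false) :
    pvRunB (some p) ('-' :: d :: r) = pvRunB (some p) (d :: r) := by
  rw [pvRunB_cons_dash]
  simp [hd, pvFlank, h]

-- L4c: a dash flanked by alnum characters is kept
theorem pvRunB_dash_keep (p : Char) (d : Char) (r : List Char) (hd : d ≠ '-')
    (h : (PySem.Chars.isalnum p && PySem.Chars.isalnum d) = true) :
    pvRunB (some p) ('-' :: d :: r) = '-' :: pvRunB (some '-') (d :: r) := by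
  rw [pvRunB_cons_dash]
  simp [hd, pvFlank, h]

-- find on w ++ '-'::r with clean w points at the first dash
theorem pvFindDash (w r : List Char) (hw : '-' ∉ w) :
    PySem.Chars.find (w ++ '-' :: r) ['-'] = (w.length : Int) := by
  have hpre : ['-'] <+: (w ++ '-' :: r).drop w.length := by
    rw [List.drop_left]; exact ⟨r, rfl⟩
  have hnn : 0 ≤ PySem.Chars.find (w ++ '-' :: r) ['-'] := by
    rw [PySem.Chars.find_nonneg_iff]
    exact (PySem.Chars.isIn_iff_infix ['-'] _).mp
      ((PySem.Chars.exists_prefix_drop_iff_isIn ['-'] _).mp ⟨w.length, hpre⟩)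
  obtain ⟨h1, h2⟩ := PySem.Chars.find_spec hnn
  set f := (PySem.Chars.find (w ++ '-' :: r) ['-']).toNat with hf
  have hfw : f = w.length := by
    rcases lt_trichotomy f w.length with hlt | heq | hgt
    · exfalso
      obtain ⟨t, ht⟩ := h1
      have hdw : (w ++ '-' :: r).drop f = w.drop f ++ '-' :: r := List.drop_append_of_le_length (le_of_lt hlt)
      rw [hdw] at ht
      cases hwd : w.drop f with
      | nil =>
        have hl := congrArg List.length hwd
        simp [List.length_drop] at hl
        omega
      | cons c w'' =>
        rw [hwd] at ht
        simp at ht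
        exact hw (ht.1 ▸ (List.mem_of_mem_drop (hwd ▸ List.mem_cons_self)))
    · exact heq
    · exact absurd hpre (h2 w.length hgt)
  omega

-- the KEY invariant: with the processed prefix u in place and start_pos = |u|, A's loop
-- appends exactly B's one-pass result on the unprocessed suffix v.
theorem pvKey : ∀ (fuel : Nat) (u v : List Char), v.length < fuel →
    pvLoopA fuel (u ++ v) (u.length : Int) = u ++ pvRunB u.getLast? v := by
  intro fuel
  induction fuel with
  | zero => intro u v h; omega
  | succ n ih =>
    intro u v hfuel
    have hk : u.length ≤ (u ++ v).length := by simp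
    rw [pvLoopA]
    rw [PySem.Chars.findFrom_natCast (u ++ v) ['-'] u.length hk, List.drop_left]
    by_cases hd : '-' ∈ v
    · -- v = w ++ '-' :: r with clean w
      obtain ⟨w, r, hw, hv⟩ : ∃ w r, '-' ∉ w ∧ v = w ++ '-' :: r := by
        have hdrop : v.dropWhile (fun c => c ≠ '-') ≠ [] := by
          intro hnil
          rw [List.dropWhile_eq_nil_iff] at hnil
          have := hnil '-' hd
          simp at this
        obtain ⟨r, hr⟩ : ∃ r, v.dropWhile (fun c => c ≠ '-') = '-' :: r := by
          have hc := not_ne_iff.mp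
            (of_decide_eq_false (List.head_dropWhile_not (fun c => decide (c ≠ '-')) (w := hdrop)))
          refine ⟨(v.dropWhile (fun c => c ≠ '-')).tail, ?_⟩
          conv_lhs => rw [← List.cons_head_tail hdrop]
          rw [hc]
        refine ⟨v.takeWhile (fun c => c ≠ '-'), r, ?_, ?_⟩
        · intro hmem
          have := List.mem_takeWhile_imp hmem
          simp at this
        · rw [← hr, List.takeWhile_append_dropWhile]
      subst hv
      have hfind := pvFindDash w r hw
      rw [hfind]
      have hne : ¬ ((if (w.length : Int) = -1 then (-1 : Int) else (u.length : Int) + (w.length : Int)) = -1) := by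
        split <;> omega
      rw [if_pos hne]
      have hidx : (if (w.length : Int) = -1 then (-1 : Int) else (u.length : Int) + (w.length : Int))
          = ((u.length + w.length : Nat) : Int) := by split <;> omega
      rw [hidx]
      have hlen : PySem.Chars.len (u ++ (w ++ '-' :: r)) = ((u.length + w.length + 1 + r.length : Nat) : Int) := by
        simp [PySem.Chars.len_eq]; ring
      by_cases h0 : u.length + w.length = 0
      · -- index == 0 : drop the leading dash
        have hu : u = [] := by rw [List.eq_nil_iff_length_eq_zero]; omega
        have hwnil : w = [] := by rw [List.eq_nil_iff_length_eq_zero]; omega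
        subst hu; subst hwnil
        rw [if_pos (by simp)]
        simp only [List.nil_append]
        have hslice : PySem.Chars.slice ('-' :: r) (some 1) none = r := by
          simp [pysem]
        rw [hslice]
        have hIH := ih [] r (by simp at hfuel; omega)
        simp only [List.nil_append, List.getLast?_nil, List.length_nil] at hIH
        norm_num at hIH ⊢
        rw [hIH, pvRunB_none_dash]
      · rw [if_neg (by push_cast; omega)]
        rw [hlen]
        by_cases hrnil : r = []
        · -- index == len-1 : drop the trailing dash
          subst hrnil
          simp only [List.length_nil, Nat.add_zero]
          rw [if_pos (by push_cast; omega)]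
          have hslice : PySem.Chars.slice (u ++ (w ++ ['-'])) none
              (some (((u.length + w.length + 1 : Nat) : Int) - 1)) = u ++ w := by
            simp only [PySem.Chars.slice_eq_listSlice]
            rw [show (((u.length + w.length + 1 : Nat) : Int) - 1) = (((u ++ w).length : Nat) : Int) by
              simp only [List.length_append]; push_cast; omega]
            rw [PySem.List.slice_to_natCast,
              show u ++ (w ++ ['-']) = (u ++ w) ++ ['-'] by simp, List.take_left]
          rw [hslice]
          have hIH := ih (u ++ w) []
            (by simp only [List.length_nil]
                have h2 : (w ++ ['-']).length = w.length + 1 := by simp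
                omega)
          rw [List.append_nil, pvRunB_nil, List.append_nil] at hIH
          rw [show ((u.length + w.length : Nat) : Int) = ((u ++ w).length : Int) by simp]
          rw [hIH, pvRunB_clean_trailing u.getLast? w hw]
        · -- interior dash
          obtain ⟨d, r₂, hre⟩ : ∃ d r₂, r = d :: r₂ := by
            cases r with
            | nil => exact absurd rfl hrnil
            | cons d r₂ => exact ⟨d, r₂, rfl⟩
          subst hre
          rw [if_neg (by simp only [List.length_cons]; push_cast; omega)]
          -- the two flank slices are singletons
          set nn := u.length + w.length with hnn
          have hq : (u ++ w) ≠ [] := by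
            intro hnil
            have h2 := congrArg List.length hnil
            simp only [List.length_append, List.length_nil] at h2
            omega
          obtain ⟨p, hp⟩ := Option.isSome_iff_exists.mp (List.getLast?_isSome.mpr hq)
          have hqdec : u ++ w = (u ++ w).dropLast ++ [p] := by
            have h3 : (u ++ w).getLast? = some ((u ++ w).getLast hq) := List.getLast?_eq_some_getLast hq
            rw [hp] at h3
            simp only [Option.some.injEq] at h3
            rw [h3]
            exact (List.dropLast_append_getLast hq).symm
          have hdllen : (u ++ w).dropLast.length = nn - 1 := by
            simp [List.length_dropLast, hnn]
          have htok : u ++ (w ++ '-' :: d :: r₂) = ((u ++ w).dropLast ++ [p]) ++ '-' :: d :: r₂ := by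
            rw [← hqdec]; simp
          have hsliceL : PySem.Chars.slice (u ++ (w ++ '-' :: d :: r₂)) (some ((nn : Int) - 1)) (some (nn : Int)) = [p] := by
            simp only [PySem.Chars.slice_eq_listSlice]
            rw [show ((nn : Int) - 1) = ((nn - 1 : Nat) : Int) by omega]
            rw [PySem.List.slice_natCast]
            rw [htok, List.append_assoc, List.drop_append_of_le_length (by rw [hdllen])]
            rw [show (u++w).dropLast.drop (nn-1) = [] by rw [List.drop_eq_nil_iff, hdllen]]
            rw [show nn - (nn - 1) = 1 by omega]
            simp
          have hsliceR : PySem.Chars.slice (u ++ (w ++ '-' :: d :: r₂)) (some ((nn : Int) + 1)) (some ((nn : Int) + 2)) = [d] := by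
            simp only [PySem.Chars.slice_eq_listSlice]
            rw [show ((nn : Int) + 1) = ((nn + 1 : Nat) : Int) by omega,
                show ((nn : Int) + 2) = ((nn + 2 : Nat) : Int) by omega]
            rw [PySem.List.slice_natCast]
            have harr2 : u ++ (w ++ '-' :: d :: r₂) = (u ++ w ++ ['-']) ++ d :: r₂ := by simp
            have hlen2 : (u ++ w ++ ['-']).length = nn + 1 := by
              simp only [List.length_append, List.length_cons, List.length_nil, hnn]
            rw [harr2, List.drop_append_of_le_length (by rw [hlen2])]
            rw [show (u ++ w ++ ['-']).drop (nn+1) = [] by rw [List.drop_eq_nil_iff, hlen2]]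
            rw [show nn + 2 - (nn + 1) = 1 by omega]
            simp
          have hstr : ∀ c : Char, PySem.Chars.strIsalnum [c] = PySem.Chars.isalnum c := by
            intro c; simp [PySem.Chars.strIsalnum]
          rw [show ((u.length : Int) + (w.length : Int)) = (nn : Int) by simp [hnn]] at *
          rw [hsliceL, hsliceR, hstr, hstr]
          -- rewrite the RHS with the clean-prefix lemma
          rw [pvRunB_clean_append w hw, ← List.getLast?_append, hp]
          have hIHfuel : (d :: r₂).length < n := by
            have h2 : (w ++ '-' :: d :: r₂).length = w.length + r₂.length + 2 := by
              simp only [List.length_append, List.length_cons]; omega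
            simp only [List.length_cons]; omega
          have hsliceTake : PySem.Chars.slice (u ++ (w ++ '-' :: d :: r₂)) none (some (nn : Int)) = u ++ w := by
            simp only [PySem.Chars.slice_eq_listSlice]
            rw [PySem.List.slice_to_natCast,
              show u ++ (w ++ '-' :: d :: r₂) = (u ++ w) ++ '-' :: d :: r₂ by simp,
              show nn = (u ++ w).length by simp [hnn], List.take_left]
          have hsliceFrom : PySem.Chars.slice (u ++ (w ++ '-' :: d :: r₂)) (some ((nn : Int) + 1)) none = d :: r₂ := by
            simp only [PySem.Chars.slice_eq_listSlice]
            rw [show ((nn : Int) + 1) = ((nn + 1 : Nat) : Int) by push_cast; omega,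
              PySem.List.slice_from_natCast,
              show u ++ (w ++ '-' :: d :: r₂) = (u ++ w ++ ['-']) ++ d :: r₂ by simp,
              show nn + 1 = (u ++ w ++ ['-']).length by
                simp only [List.length_append, List.length_cons, List.length_nil, hnn],
              List.drop_left]
          by_cases hcond : (!PySem.Chars.isalnum p || !PySem.Chars.isalnum d) = true
          · rw [if_pos hcond, hsliceTake, hsliceFrom]
            have hIH := ih (u ++ w) (d :: r₂) hIHfuel
            rw [hp] at hIH
            rw [show ((nn : Nat) : Int) = ((u ++ w).length : Int) by simp [hnn], hIH]
            by_cases hdd : d = '-'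
            · subst hdd
              rw [pvRunB_dash_dash, List.append_assoc]
            · have hab : (PySem.Chars.isalnum p && PySem.Chars.isalnum d) = false := by
                revert hcond
                cases PySem.Chars.isalnum p <;> cases PySem.Chars.isalnum d <;> simp
              rw [pvRunB_dash_drop p d r₂ hdd hab, List.append_assoc]
          · rw [if_neg hcond]
            have hab : (PySem.Chars.isalnum p && PySem.Chars.isalnum d) = true := by
              revert hcond
              cases PySem.Chars.isalnum p <;> cases PySem.Chars.isalnum d <;> simp
            have hdd : d ≠ '-' := by
              intro hdd
              subst hdd
              rw [show PySem.Chars.isalnum '-' = false from by decide] at hab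
              simp at hab
            rw [pvRunB_dash_keep p d r₂ hdd hab]
            have hIH := ih (u ++ w ++ ['-']) (d :: r₂) hIHfuel
            rw [show ((nn : Nat) : Int) + 1 = ((u ++ w ++ ['-']).length : Int) by
              simp only [List.length_append, List.length_cons, List.length_nil, hnn]; push_cast; omega] at *
            rw [show u ++ (w ++ '-' :: d :: r₂) = (u ++ w ++ ['-']) ++ d :: r₂ by simp, hIH]
            rw [show (u ++ w ++ ['-']).getLast? = some '-' by simp]
            simp [List.append_assoc]
    · -- no dash left: the loop exits and B copies v
      have hfind : PySem.Chars.find v ['-'] = -1 := by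
        rw [PySem.Chars.find_eq_neg_one_iff]
        intro hinf
        exact hd (hinf.subset (by simp))
      rw [hfind]
      rw [if_neg (by simp), pvRunB_clean _ v hd]

-- per token, A's loop with fuel len+1 equals B's single pass
theorem pvToken (t : List Char) : pvLoopA (t.length + 1) t 0 = pvRunB none t := by
  have := pvKey (t.length + 1) [] t (by omega)
  simpa using this

-- ===== VERDICT (by name: the statement is the Claim_ definition above) =====
theorem tokenize_dashes_spec : Claim_equal_tokenize_dashes := by
  intro tokens _
  unfold Spec_tokenize_dashes tokenize_dashes tokenize_dashes_alt
  apply List.foldl_ext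
  intro acc t _
  rw [pvToken]
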